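-- pv_equiv track=rewrite | github.com/nforesperance/Search-Engine | search_app/filter.py | getElement
-- ===== SOURCE A (Python) =====
-- def getElement(search,elts):
--     arr = []
--     for elt in elts:
--         if search in elt:
--             arr.append(elt)
--     if len(arr)>0:
--         max = len(arr[0])
--         elt = arr[0]
--         for s in arr:
--             if len(s)>max:
--                 max = len(s)
--                 elt = s
--         return elt
--     else:
--         return ""
-- ===== SOURCE B (Python) =====
-- def getElement(search, elts):
--     best = None
--     best_len = -1
--     for elt in elts:
--         if search in elt:
--             if len(elt) > best_len:
--                 best = elt
--                 best_len = len(elt)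
--     return best if best is not None else ""
-- ===== Notes on version B (the rewrite author's own statement) =====
-- stated objective: simpler
-- what changed: Single pass with a running best/best_len accumulator instead of building a filtered list and then scanning it for the longest element.
import Mathlib
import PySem

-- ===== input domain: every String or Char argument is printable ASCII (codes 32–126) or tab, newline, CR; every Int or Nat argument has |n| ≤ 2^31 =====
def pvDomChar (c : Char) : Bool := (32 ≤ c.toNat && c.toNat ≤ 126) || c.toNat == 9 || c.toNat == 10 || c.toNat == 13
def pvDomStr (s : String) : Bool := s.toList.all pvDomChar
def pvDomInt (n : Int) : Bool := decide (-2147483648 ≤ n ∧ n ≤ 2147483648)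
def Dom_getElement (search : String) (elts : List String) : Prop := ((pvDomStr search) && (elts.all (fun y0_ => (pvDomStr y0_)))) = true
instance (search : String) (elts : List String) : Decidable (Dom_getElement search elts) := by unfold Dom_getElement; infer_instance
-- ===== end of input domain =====

-- B: single pass with a running best/best_len accumulator instead of A's build-filtered-list-then-scan (objective: simpler).
-- ===== PORT A =====
def getElement (search : String) (elts : List String) : String :=
  let arr := elts.foldl (fun arr elt => if PySem.Str.isIn search elt then arr ++ [elt] else arr) []
  match arr with
  | [] => ""
  | a :: _ =>
    (arr.foldl (fun st s => if PySem.Str.len s > st.1 then (PySem.Str.len s, s) else st)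
      (PySem.Str.len a, a)).2

-- ===== PORT B =====
def getElement_alt (search : String) (elts : List String) : String :=
  let st := elts.foldl
    (fun st elt =>
      if PySem.Str.isIn search elt then
        if ((PySem.Str.len elt : Int) > st.2) then (some elt, (PySem.Str.len elt : Int)) else st
      else st)
    ((none : Option String), (-1 : Int))
  match st.1 with
  | some b => b
  | none => ""

-- ===== PRECONDITION & SPEC =====
def Spec_getElement (search : String) (elts : List String) (out : String) : Prop := out = getElement_alt search elts
instance (search : String) (elts : List String) (out : String) : Decidable (Spec_getElement search elts out) := by unfold Spec_getElement; infer_instance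

-- ===== CLAIM (what is proved, stated in full; the proofs are below) =====
def Claim_equal_getElement : Prop := ∀ (search : String) (elts : List String), Dom_getElement search elts → Spec_getElement search elts (getElement search elts)

-- ===== LEMMAS AND PROOFS =====

-- ===== VERDICT (by name: the statement is the Claim_ definition above) =====
-- skip-nonmatching fold = fold over the filtered list
theorem fold_skip_eq_filter {α β : Type} (c : β → Bool) (g : α → β → α) :
    ∀ (l : List β) (st : α),
      l.foldl (fun st x => if c x then g st x else st) st = (l.filter c).foldl g st := by
  intro l
  induction l with
  | nil => intro st; simp
  | cons x t ih =>
    intro st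
    by_cases h : c x = true <;> simp [List.filter, h, ih]

-- B's inner fold from (some e, len e) tracks A's max-scan fold from (len e, e)
theorem inner_tracks (t : List String) : ∀ (e : String),
    t.foldl (fun st elt =>
        if ((PySem.Str.len elt : Int) > st.2) then (some elt, (PySem.Str.len elt : Int)) else st)
      ((some e : Option String), (PySem.Str.len e : Int))
    = (some (t.foldl (fun st s => if PySem.Str.len s > st.1 then (PySem.Str.len s, s) else st)
          (PySem.Str.len e, e)).2,
       ((t.foldl (fun st s => if PySem.Str.len s > st.1 then (PySem.Str.len s, s) else st)
          (PySem.Str.len e, e)).1 : Int)) := by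
  induction t with
  | nil => intro e; simp
  | cons s t ih =>
    intro e
    by_cases h : PySem.Str.len s > PySem.Str.len e
    · simp only [List.foldl_cons, if_pos h]
      exact ih s
    · simp only [List.foldl_cons, if_neg h]
      exact ih e

theorem getElement_spec : Claim_equal_getElement := by
  intro search elts _
  unfold Spec_getElement getElement getElement_alt
  rw [PySem.List.foldl_append_if_eq_filter, fold_skip_eq_filter]
  simp only [List.nil_append]
  cases h : elts.filter (fun elt => PySem.Str.isIn search elt) with
  | nil => simp
  | cons a t =>
    simp only [List.foldl_cons]
    have hfirst : (if ((PySem.Str.len a : Int) > (-1 : Int))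
        then ((some a : Option String), (PySem.Str.len a : Int))
        else ((none : Option String), (-1 : Int)))
        = ((some a : Option String), (PySem.Str.len a : Int)) := by
      have : (0 : Int) ≤ (PySem.Str.len a : Int) := Int.natCast_nonneg _
      simp; omega
    rw [hfirst, inner_tracks]
    simp
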